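-- pv_equiv track=rewrite | github.com/suleymanozkeskin/unicode-animations-py | unicode_animations/braille.py | grid_to_braille
-- ===== SOURCE A (Python) =====
-- import math
--
-- BRAILLE_DOT_MAP = [
--     [0x01, 0x08],  # row 0
--     [0x02, 0x10],  # row 1
--     [0x04, 0x20],  # row 2
--     [0x40, 0x80],  # row 3
-- ]
--
-- def _grid_chunk_to_braille(chunk: list[list[bool]], cols: int) -> str:
--     """Encode up to 4 grid rows into one braille text line."""
--     char_count = math.ceil(cols / 2)
--     result: list[str] = []
--     for c in range(char_count):
--         code = 0x2800
--         for r in range(min(4, len(chunk))):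
--             row = chunk[r]
--             for d in range(2):
--                 col = c * 2 + d
--                 if col < len(row) and row[col]:
--                     code |= BRAILLE_DOT_MAP[r][d]
--         result.append(chr(code))
--     return "".join(result)
--
-- def grid_to_braille(grid: list[list[bool]]) -> str:
--     """Convert a 2D boolean grid into braille text.
--
--     grid[row][col] = True means dot is raised.
--     A single line of braille encodes up to 4 grid rows. Taller grids are
--     encoded as multiple newline-separated braille lines.
--     """
--     if not grid:
--         return ""
--
--     rows = len(grid)
--     cols = max((len(row) for row in grid), default=0)
--     if cols == 0:
--         return ""
--
--     if rows <= 4: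
--         return _grid_chunk_to_braille(grid, cols)
--
--     lines: list[str] = []
--     for start in range(0, rows, 4):
--         chunk = list(grid[start:start + 4])
--         if len(chunk) < 4:
--             chunk += [[False] * cols for _ in range(4 - len(chunk))]
--         lines.append(_grid_chunk_to_braille(chunk, cols))
--     return "\n".join(lines)
-- ===== SOURCE B (Python) =====
-- BRAILLE_DOT_MAP = [
--     [0x01, 0x08],  # row 0
--     [0x02, 0x10],  # row 1
--     [0x04, 0x20],  # row 2
--     [0x40, 0x80],  # row 3
-- ]
--
-- def grid_to_braille(grid: list[list[bool]]) -> str: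
--     """Scatter version: one pass over the set cells, OR-ing each dot bit
--     into a pre-initialized matrix of braille code points."""
--     if not grid:
--         return ""
--     cols = max(len(row) for row in grid)
--     if cols == 0:
--         return ""
--     rows = len(grid)
--     num_lines = (rows + 3) // 4
--     char_count = (cols + 1) // 2
--     codes = [[0x2800] * char_count for _ in range(num_lines)]
--     for r, row in enumerate(grid):
--         for c, v in enumerate(row):
--             if v:
--                 codes[r // 4][c // 2] |= BRAILLE_DOT_MAP[r % 4][c % 2]
--     return "\n".join("".join(map(chr, line)) for line in codes)
-- ===== Notes on version B (the rewrite author's own statement) =====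
-- stated objective: faster
-- what changed: Replaced the gather of A (slice the grid into padded 4-row chunks and, per braille character, probe up to 8 bounds-checked grid cells) by a single scatter pass: a lines x chars matrix is pre-filled with 0x2800 and each grid cell ORs its dot bit into codes[r//4][c//2], so chunk slicing, padding rows and per-character cell probing disappear.
import Mathlib
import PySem

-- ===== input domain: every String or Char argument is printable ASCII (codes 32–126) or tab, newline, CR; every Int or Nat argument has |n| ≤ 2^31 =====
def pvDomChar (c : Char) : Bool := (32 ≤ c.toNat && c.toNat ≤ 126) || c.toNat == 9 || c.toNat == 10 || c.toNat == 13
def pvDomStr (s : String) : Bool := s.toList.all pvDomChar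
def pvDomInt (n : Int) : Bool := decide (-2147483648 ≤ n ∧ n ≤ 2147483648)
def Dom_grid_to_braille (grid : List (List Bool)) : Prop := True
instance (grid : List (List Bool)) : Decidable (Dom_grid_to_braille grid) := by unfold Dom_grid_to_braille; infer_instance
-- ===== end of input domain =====

-- B re-implements A's gather (padded 4-row chunks, per-character scan of 8 cells) as a single
-- scatter pass over the grid cells into a pre-initialized code matrix; return values proved equal.

-- ===== PORT A =====
def brailleDotMap : List (List Nat) := [[0x01, 0x08], [0x02, 0x10], [0x04, 0x20], [0x40, 0x80]]

-- literal port of _grid_chunk_to_braille; math.ceil(cols/2) = (cols+1)/2 exactly on Nat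
def gridChunkToBraille (chunk : List (List Bool)) (cols : Nat) : String :=
  let charCount := (cols + 1) / 2
  let result := (List.range charCount).foldl (fun res c =>
    let code := (List.range (min 4 chunk.length)).foldl (fun code r =>
      let row := chunk.getD r []
      (List.range 2).foldl (fun code d =>
        let col := c * 2 + d
        if col < row.length ∧ row.getD col false = true then
          code ||| ((brailleDotMap.getD r []).getD d 0)
        else code) code) 0x2800
    res ++ [Char.ofNat code]) []
  String.mk result

-- the loop `for start in range(0, rows, 4): chunk = grid[start:start+4]`
def chunksA (g : List (List Bool)) : List (List (List Bool)) :=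
  if g = [] then [] else g.take 4 :: chunksA (g.drop 4)
termination_by g.length
decreasing_by
  rename_i h
  have h0 : 0 < g.length := List.length_pos_of_ne_nil h
  simp only [List.length_drop]; omega

def grid_to_braille (grid : List (List Bool)) : String :=
  if grid = [] then "" else
  let rows := grid.length
  let cols := (grid.map List.length).foldl max 0   -- max(..., default=0)
  if cols = 0 then "" else
  if rows ≤ 4 then gridChunkToBraille grid cols
  else
    let lines := (chunksA grid).map (fun ch =>
      let ch := if ch.length < 4 then ch ++ List.replicate (4 - ch.length) (List.replicate cols false) else ch
      gridChunkToBraille ch cols)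
    PySem.Str.join "\n" lines

-- ===== PORT B =====
-- codes[i][j] |= w  (BRAILLE_DOT_MAP is the same module constant as in A: brailleDotMap)
def update2 (m : List (List Nat)) (i j w : Nat) : List (List Nat) :=
  m.set i ((m.getD i []).set j (((m.getD i []).getD j 0) ||| w))

-- for c, v in enumerate(row): if v: codes[r//4][c//2] |= BRAILLE_DOT_MAP[r%4][c%2]
def scatterRowB (m : List (List Nat)) (r c : Nat) : List Bool → List (List Nat)
  | [] => m
  | v :: rest =>
      scatterRowB
        (if v then update2 m (r / 4) (c / 2) ((brailleDotMap.getD (r % 4) []).getD (c % 2) 0) else m)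
        r (c + 1) rest

-- for r, row in enumerate(grid)
def scatterB (m : List (List Nat)) (r : Nat) : List (List Bool) → List (List Nat)
  | [] => m
  | row :: rest => scatterB (scatterRowB m r 0 row) (r + 1) rest

def grid_to_braille_alt (grid : List (List Bool)) : String :=
  if grid = [] then "" else
  let cols := (grid.map List.length).foldl max 0
  if cols = 0 then "" else
  let rows := grid.length
  let numLines := (rows + 3) / 4
  let charCount := (cols + 1) / 2
  let init := List.replicate numLines (List.replicate charCount 0x2800)
  let codes := scatterB init 0 grid
  PySem.Str.join "\n" (codes.map (fun line => String.mk (line.map Char.ofNat)))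

-- ===== PRECONDITION & SPEC =====
def Spec_grid_to_braille (grid : List (List Bool)) (out : String) : Prop := out = grid_to_braille_alt grid
instance (grid : List (List Bool)) (out : String) : Decidable (Spec_grid_to_braille grid out) := by unfold Spec_grid_to_braille; infer_instance

-- ===== CLAIM (what is proved, stated in full; the proofs are below) =====
def Claim_equal_grid_to_braille : Prop := ∀ (grid : List (List Bool)), Dom_grid_to_braille grid → Spec_grid_to_braille grid (grid_to_braille grid)

-- ===== LEMMAS AND PROOFS =====

-- cell lookup with out-of-range = False (padding rows and missing rows both read as False)
def cell (g : List (List Bool)) (r c : Nat) : Bool := (g.getD r []).getD c false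

def bitOf (g : List (List Bool)) (r c w : Nat) : Nat := if cell g r c = true then w else 0

-- the code point of braille character (i, j); term order = A's gather order = B's scan order
def specCode (g : List (List Bool)) (i j : Nat) : Nat :=
  0x2800 ||| bitOf g (4*i) (j*2) 1 ||| bitOf g (4*i) (j*2+1) 8
         ||| bitOf g (4*i+1) (j*2) 2 ||| bitOf g (4*i+1) (j*2+1) 16
         ||| bitOf g (4*i+2) (j*2) 4 ||| bitOf g (4*i+2) (j*2+1) 32
         ||| bitOf g (4*i+3) (j*2) 64 ||| bitOf g (4*i+3) (j*2+1) 128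

def specStr (g : List (List Bool)) (L C : Nat) : String :=
  PySem.Str.join "\n" ((List.range L).map (fun i =>
    String.mk ((List.range C).map (fun j => Char.ofNat (specCode g i j)))))

theorem strjoin_single (x : String) : PySem.Str.join "\n" [x] = x := by
  simp [PySem.Str.join, PySem.Chars.join_singleton]

theorem lor_ite (p : Prop) [Decidable p] (a w : Nat) :
    (if p then a ||| w else a) = a ||| (if p then w else 0) := by
  split_ifs <;> simp

theorem cond_getD (row : List Bool) (col : Nat) :
    (col < row.length ∧ row[col]?.getD false = true) ↔ row[col]?.getD false = true := by
  constructor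
  · exact fun h => h.2
  · intro h
    refine ⟨?_, h⟩
    by_contra hlt
    rw [List.getElem?_eq_none (by omega)] at h
    exact Bool.false_ne_true h

-- ---- A side ----

theorem codeA_eq (chunk : List (List Bool)) (h : chunk.length ≤ 4) (c : Nat) :
    ((List.range (min 4 chunk.length)).foldl (fun code r =>
      let row := chunk.getD r []
      (List.range 2).foldl (fun code d =>
        let col := c * 2 + d
        if col < row.length ∧ row.getD col false = true then
          code ||| ((brailleDotMap.getD r []).getD d 0)
        else code) code) 0x2800) = specCode chunk 0 c := by
  obtain _ | ⟨r0, _ | ⟨r1, _ | ⟨r2, _ | ⟨r3, _ | ⟨r4, rest⟩⟩⟩⟩⟩ := chunk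
  · simp [specCode, bitOf, cell, brailleDotMap, lor_ite, cond_getD, List.range_succ, Nat.lor_assoc]
  · simp [specCode, bitOf, cell, brailleDotMap, lor_ite, cond_getD, List.range_succ, Nat.lor_assoc]
  · simp [specCode, bitOf, cell, brailleDotMap, lor_ite, cond_getD, List.range_succ, Nat.lor_assoc]
  · simp [specCode, bitOf, cell, brailleDotMap, lor_ite, cond_getD, List.range_succ, Nat.lor_assoc]
  · simp [specCode, bitOf, cell, brailleDotMap, lor_ite, cond_getD, List.range_succ, Nat.lor_assoc]
  · simp only [List.length_cons] at h
    omega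

theorem chunk_to_braille_eq (chunk : List (List Bool)) (h : chunk.length ≤ 4) (cols : Nat) :
    gridChunkToBraille chunk cols =
      String.mk ((List.range ((cols + 1) / 2)).map (fun j => Char.ofNat (specCode chunk 0 j))) := by
  simp only [gridChunkToBraille, PySem.List.foldl_append_singleton_eq_map, List.nil_append]
  congr 1
  apply List.map_congr_left
  intro j _
  rw [codeA_eq chunk h j]

theorem cell_drop (g : List (List Bool)) (n r c : Nat) :
    cell (g.drop n) r c = cell g (n + r) c := by
  simp [cell, List.getD, List.getElem?_drop]

theorem cell_take (g : List (List Bool)) (n r c : Nat) (h : r < n) :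
    cell (g.take n) r c = cell g r c := by
  simp [cell, List.getD, h]

theorem getD_getD_replicate (k cols t c : Nat) :
    ((List.replicate k (List.replicate cols false)).getD t []).getD c false = false := by
  rcases Nat.lt_or_ge t k with ht | ht
  · rw [List.getD_replicate _ ht]
    rcases Nat.lt_or_ge c cols with hc | hc
    · exact List.getD_replicate _ hc
    · exact List.getD_eq_default _ _ (by simpa using hc)
  · have h1 : (List.replicate k (List.replicate cols false)).getD t [] = [] :=
      List.getD_eq_default _ _ (by simpa using ht)
    rw [h1]
    rfl

theorem cell_pad (ch : List (List Bool)) (k cols r c : Nat) :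
    cell (ch ++ List.replicate k (List.replicate cols false)) r c = cell ch r c := by
  unfold cell
  rcases Nat.lt_or_ge r ch.length with hr | hr
  · rw [List.getD_append _ _ _ _ hr]
  · have hrhs : (ch.getD r []).getD c false = false := by
      rw [List.getD_eq_default _ _ hr]; rfl
    rw [hrhs, List.getD_append_right _ _ _ _ hr]
    exact getD_getD_replicate _ _ _ _

theorem chunksA_length (g : List (List Bool)) : (chunksA g).length = (g.length + 3) / 4 := by
  induction g using chunksA.induct with
  | case1 => simp [chunksA]
  | case2 g hg ih =>
      rw [chunksA, if_neg hg]
      have h0 : 0 < g.length := List.length_pos_of_ne_nil hg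
      simp only [List.length_cons, ih, List.length_drop]
      omega

theorem chunksA_getD (g : List (List Bool)) (k : Nat) :
    (chunksA g).getD k [] = (g.drop (4*k)).take 4 := by
  induction g using chunksA.induct generalizing k with
  | case1 => simp [chunksA]
  | case2 g hg ih =>
      rw [chunksA, if_neg hg]
      cases k with
      | zero => simp
      | succ k =>
          simp only [List.getD_cons_succ, ih k, List.drop_drop]
          congr 2
          omega

theorem cell_chunk (g : List (List Bool)) (cols k r c : Nat) (hr : r < 4) :
    cell (if ((g.drop (4*k)).take 4).length < 4 then
            (g.drop (4*k)).take 4 ++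
              List.replicate (4 - ((g.drop (4*k)).take 4).length) (List.replicate cols false)
          else (g.drop (4*k)).take 4) r c = cell g (4*k + r) c := by
  have hbase : cell ((g.drop (4*k)).take 4) r c = cell g (4*k + r) c := by
    rw [cell_take _ _ _ _ hr, cell_drop]
  split_ifs
  · rw [cell_pad]; exact hbase
  · exact hbase

theorem specCode_chunk (g : List (List Bool)) (cols k j : Nat) :
    specCode (if ((g.drop (4*k)).take 4).length < 4 then
                (g.drop (4*k)).take 4 ++
                  List.replicate (4 - ((g.drop (4*k)).take 4).length) (List.replicate cols false)
              else (g.drop (4*k)).take 4) 0 j = specCode g k j := by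
  unfold specCode bitOf
  rw [show 4*0 = 0 from rfl]
  rw [cell_chunk g cols k 0 _ (by omega), cell_chunk g cols k 0 _ (by omega),
      cell_chunk g cols k 1 _ (by omega), cell_chunk g cols k 1 _ (by omega),
      cell_chunk g cols k 2 _ (by omega), cell_chunk g cols k 2 _ (by omega),
      cell_chunk g cols k 3 _ (by omega), cell_chunk g cols k 3 _ (by omega)]
  simp only [Nat.add_zero, Nat.add_comm (4*k) 1, Nat.add_comm (4*k) 2, Nat.add_comm (4*k) 3]

-- ---- B side ----

def entryM (m : List (List Nat)) (i j : Nat) : Nat := (m.getD i []).getD j 0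

def GoodShape (m : List (List Nat)) (L C : Nat) : Prop :=
  m.length = L ∧ ∀ i, i < L → (m.getD i []).length = C

theorem getD_set {α : Type} (l : List α) (a i : Nat) (x d : α) :
    (l.set a x).getD i d = if i = a ∧ a < l.length then x else l.getD i d := by
  simp only [List.getD, List.getElem?_set]
  split_ifs <;> simp_all

theorem shape_update2 (m : List (List Nat)) (L C a b w : Nat) (hm : GoodShape m L C) :
    GoodShape (update2 m a b w) L C := by
  obtain ⟨h1, h2⟩ := hm
  refine ⟨by simp [update2, h1], fun i hi => ?_⟩
  rw [update2, getD_set]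
  split_ifs with h
  · rw [List.length_set]
    exact h2 a (h1 ▸ h.2)
  · exact h2 i hi

theorem entry_update2 (m : List (List Nat)) (L C a b w : Nat) (hm : GoodShape m L C)
    (ha : a < L) (hb : b < C) (i j : Nat) :
    entryM (update2 m a b w) i j =
      if a = i ∧ b = j then entryM m i j ||| w else entryM m i j := by
  obtain ⟨h1, h2⟩ := hm
  unfold entryM update2
  rw [getD_set]
  by_cases hia : a = i
  · subst hia
    rw [if_pos ⟨rfl, h1 ▸ ha⟩, getD_set]
    have hbl : b < (m.getD a []).length := by rw [h2 a ha]; exact hb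
    by_cases hjb : b = j
    · subst hjb
      rw [if_pos ⟨rfl, hbl⟩, if_pos ⟨rfl, rfl⟩]
    · rw [if_neg (fun hh => hjb hh.1.symm), if_neg (fun hh => hjb hh.2)]
  · rw [if_neg (fun hh => hia hh.1.symm), if_neg (fun hh => hia hh.1)]

def rowBitsD (r c : Nat) (row : List Bool) (i j : Nat) : Nat :=
  match row with
  | [] => 0
  | v :: rest =>
      (if v = true ∧ r / 4 = i ∧ c / 2 = j then (brailleDotMap.getD (r % 4) []).getD (c % 2) 0 else 0) |||
        rowBitsD r (c + 1) rest i j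

def gridBitsD (r : Nat) (g : List (List Bool)) (i j : Nat) : Nat :=
  match g with
  | [] => 0
  | row :: rest => rowBitsD r 0 row i j ||| gridBitsD (r + 1) rest i j

theorem shape_scatterRowB (row : List Bool) (m : List (List Nat)) (L C r c : Nat)
    (hm : GoodShape m L C) : GoodShape (scatterRowB m r c row) L C := by
  induction row generalizing m c with
  | nil => exact hm
  | cons v rest ih =>
      rw [scatterRowB]
      apply ih
      split_ifs
      · exact shape_update2 _ _ _ _ _ _ hm
      · exact hm

theorem entry_scatterRowB (row : List Bool) (m : List (List Nat)) (L C r c i j : Nat)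
    (hm : GoodShape m L C) (hr : r / 4 < L) (hc : c + row.length ≤ 2 * C) :
    entryM (scatterRowB m r c row) i j = entryM m i j ||| rowBitsD r c row i j := by
  induction row generalizing m c with
  | nil => simp [scatterRowB, rowBitsD]
  | cons v rest ih =>
      rw [scatterRowB, rowBitsD]
      simp only [List.length_cons] at hc
      have hb : c / 2 < C := by omega
      have hm' : GoodShape (if v = true then update2 m (r / 4) (c / 2) ((brailleDotMap.getD (r % 4) []).getD (c % 2) 0) else m) L C := by
        split_ifs
        · exact shape_update2 _ _ _ _ _ _ hm
        · exact hm
      rw [ih _ _ hm' (by omega)]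
      have hstep : entryM (if v = true then update2 m (r / 4) (c / 2) ((brailleDotMap.getD (r % 4) []).getD (c % 2) 0) else m) i j =
          entryM m i j ||| (if v = true ∧ r / 4 = i ∧ c / 2 = j then (brailleDotMap.getD (r % 4) []).getD (c % 2) 0 else 0) := by
        cases v with
        | false => simp
        | true =>
            rw [if_pos rfl]
            rw [entry_update2 m L C _ _ _ ⟨hm.1, hm.2⟩ hr hb]
            simp only [true_and]
            exact lor_ite _ _ _
      rw [hstep, Nat.lor_assoc]

theorem shape_scatterB (g : List (List Bool)) (m : List (List Nat)) (L C r : Nat)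
    (hm : GoodShape m L C) : GoodShape (scatterB m r g) L C := by
  induction g generalizing m r with
  | nil => exact hm
  | cons row rest ih =>
      rw [scatterB]
      exact ih _ _ (shape_scatterRowB _ _ _ _ _ _ hm)

theorem entry_scatterB (g : List (List Bool)) (m : List (List Nat)) (L C r i j : Nat)
    (hm : GoodShape m L C) (hr : r + g.length ≤ 4 * L)
    (hrow : ∀ row ∈ g, List.length row ≤ 2 * C) :
    entryM (scatterB m r g) i j = entryM m i j ||| gridBitsD r g i j := by
  induction g generalizing m r with
  | nil => simp [scatterB, gridBitsD]
  | cons row rest ih =>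
      rw [scatterB, gridBitsD]
      simp only [List.length_cons] at hr
      rw [ih _ _ (shape_scatterRowB _ _ _ _ _ _ hm) (by omega)
          (fun q hq => hrow q (List.mem_cons_of_mem _ hq))]
      rw [entry_scatterRowB row m L C r 0 i j hm (by omega)
          (by simpa using hrow row (List.mem_cons_self ..))]
      rw [Nat.lor_assoc]

theorem rowBitsD_closed (r i j : Nat) (row : List Bool) : ∀ c,
    rowBitsD r c row i j =
      if r / 4 = i then
        (if c ≤ j*2 ∧ row.getD (j*2 - c) false = true then (brailleDotMap.getD (r % 4) []).getD 0 0 else 0) |||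
        (if c ≤ j*2+1 ∧ row.getD (j*2+1 - c) false = true then (brailleDotMap.getD (r % 4) []).getD 1 0 else 0)
      else 0 := by
  induction row with
  | nil =>
      intro c
      simp [rowBitsD, List.getD_nil]
  | cons v rest ih =>
      intro c
      simp only [rowBitsD]
      rw [ih (c + 1)]
      by_cases hi4 : r / 4 = i
      · by_cases h1 : c = j*2
        · subst h1
          simp [hi4, show (j*2) / 2 = j from by omega, show (j*2) % 2 = 0 from by omega,
            show ¬(j*2+1 ≤ j*2) from by omega, show j*2 - j*2 = 0 from by omega,
            show j*2+1 - j*2 = 1 from by omega, show j*2+1 - (j*2+1) = 0 from by omega]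
        · by_cases h2 : c = j*2+1
          · subst h2
            simp [hi4, show (j*2+1) / 2 = j from by omega, show (j*2+1) % 2 = 1 from by omega,
              show ¬(j*2+1 ≤ j*2) from by omega, show ¬(j*2+1+1 ≤ j*2) from by omega,
              show ¬(j*2+1+1 ≤ j*2+1) from by omega, show j*2+1 - (j*2+1) = 0 from by omega]
          · by_cases h3 : c < j*2
            · have e1 : j*2 - c = (j*2 - (c+1)) + 1 := by omega
              have e2 : j*2+1 - c = (j*2+1 - (c+1)) + 1 := by omega
              rw [e1, e2]
              simp [hi4, show c / 2 ≠ j from by omega,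
                show c ≤ j*2 from by omega, show c+1 ≤ j*2 from by omega,
                show c ≤ j*2+1 from by omega, show c+1 ≤ j*2+1 from by omega]
            · -- c > j*2+1
              have hgt : j*2+1 < c := by omega
              simp [hi4, show c / 2 ≠ j from by omega,
                show ¬(c ≤ j*2) from by omega, show ¬(c+1 ≤ j*2) from by omega,
                show ¬(c ≤ j*2+1) from by omega, show ¬(c+1 ≤ j*2+1) from by omega]
      · simp [hi4]

def rowTermD (row : List Bool) (k j : Nat) : Nat :=
  (if row.getD (j*2) false = true then (brailleDotMap.getD k []).getD 0 0 else 0) |||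
  (if row.getD (j*2+1) false = true then (brailleDotMap.getD k []).getD 1 0 else 0)

theorem rowBits0 (r i j : Nat) (row : List Bool) :
    rowBitsD r 0 row i j = if r / 4 = i then rowTermD row (r % 4) j else 0 := by
  rw [rowBitsD_closed]
  simp [rowTermD]

theorem gridBitsD_closed (i j : Nat) (g : List (List Bool)) : ∀ r,
    gridBitsD r g i j =
      (if r ≤ i*4 then rowTermD (g.getD (i*4 - r) []) 0 j else 0) |||
      ((if r ≤ i*4+1 then rowTermD (g.getD (i*4+1 - r) []) 1 j else 0) |||
      ((if r ≤ i*4+2 then rowTermD (g.getD (i*4+2 - r) []) 2 j else 0) |||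
      (if r ≤ i*4+3 then rowTermD (g.getD (i*4+3 - r) []) 3 j else 0))) := by
  induction g with
  | nil =>
      intro r
      simp [gridBitsD, rowTermD, List.getD_nil]
  | cons row rest ih =>
      intro r
      simp only [gridBitsD]
      rw [rowBits0, ih (r + 1)]
      by_cases h0 : r = i*4
      · subst h0
        simp [show (i*4) / 4 = i from by omega, show (i*4) % 4 = 0 from by omega,
          show ¬(i*4+1 ≤ i*4) from by omega,
          show i*4 - i*4 = 0 from by omega, show i*4+1 - i*4 = 1 from by omega,
          show i*4+2 - i*4 = 2 from by omega, show i*4+3 - i*4 = 3 from by omega,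
          show i*4+1 - (i*4+1) = 0 from by omega, show i*4+2 - (i*4+1) = 1 from by omega,
          show i*4+3 - (i*4+1) = 2 from by omega]
      · by_cases h1 : r = i*4+1
        · subst h1
          simp [show (i*4+1) / 4 = i from by omega, show (i*4+1) % 4 = 1 from by omega,
            show ¬(i*4 ≥ i*4+1) from by omega, show ¬(i*4+1 ≤ i*4) from by omega,
            show ¬(i*4+1+1 ≤ i*4) from by omega, show ¬(i*4+1+1 ≤ i*4+1) from by omega,
            show i*4+1 - (i*4+1) = 0 from by omega, show i*4+2 - (i*4+1) = 1 from by omega,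
            show i*4+3 - (i*4+1) = 2 from by omega,
            show i*4+2 - (i*4+1+1) = 0 from by omega, show i*4+3 - (i*4+1+1) = 1 from by omega]
        · by_cases h2 : r = i*4+2
          · subst h2
            simp [show (i*4+2) / 4 = i from by omega, show (i*4+2) % 4 = 2 from by omega,
              show ¬(i*4+2 ≤ i*4) from by omega, show ¬(i*4+2 ≤ i*4+1) from by omega,
              show ¬(i*4+2+1 ≤ i*4) from by omega, show ¬(i*4+2+1 ≤ i*4+1) from by omega,
              show ¬(i*4+2+1 ≤ i*4+2) from by omega,
              show i*4+2 - (i*4+2) = 0 from by omega, show i*4+3 - (i*4+2) = 1 from by omega,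
              show i*4+3 - (i*4+2+1) = 0 from by omega]
          · by_cases h3 : r = i*4+3
            · subst h3
              simp [show (i*4+3) / 4 = i from by omega, show (i*4+3) % 4 = 3 from by omega,
                show ¬(i*4+3 ≤ i*4) from by omega, show ¬(i*4+3 ≤ i*4+1) from by omega,
                show ¬(i*4+3 ≤ i*4+2) from by omega,
                show ¬(i*4+3+1 ≤ i*4) from by omega, show ¬(i*4+3+1 ≤ i*4+1) from by omega,
                show ¬(i*4+3+1 ≤ i*4+2) from by omega, show ¬(i*4+3+1 ≤ i*4+3) from by omega,
                show i*4+3 - (i*4+3) = 0 from by omega]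
            · by_cases h4 : r < i*4
              · have e0 : i*4 - r = (i*4 - (r+1)) + 1 := by omega
                have e1 : i*4+1 - r = (i*4+1 - (r+1)) + 1 := by omega
                have e2 : i*4+2 - r = (i*4+2 - (r+1)) + 1 := by omega
                have e3 : i*4+3 - r = (i*4+3 - (r+1)) + 1 := by omega
                rw [e0, e1, e2, e3]
                simp [show r / 4 ≠ i from by omega,
                  show r ≤ i*4 from by omega, show r+1 ≤ i*4 from by omega,
                  show r ≤ i*4+1 from by omega, show r+1 ≤ i*4+1 from by omega,
                  show r ≤ i*4+2 from by omega, show r+1 ≤ i*4+2 from by omega,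
                  show r ≤ i*4+3 from by omega, show r+1 ≤ i*4+3 from by omega]
              · -- r > i*4+3
                simp [show r / 4 ≠ i from by omega,
                  show ¬(r ≤ i*4) from by omega, show ¬(r+1 ≤ i*4) from by omega,
                  show ¬(r ≤ i*4+1) from by omega, show ¬(r+1 ≤ i*4+1) from by omega,
                  show ¬(r ≤ i*4+2) from by omega, show ¬(r+1 ≤ i*4+2) from by omega,
                  show ¬(r ≤ i*4+3) from by omega, show ¬(r+1 ≤ i*4+3) from by omega]

theorem entry_final (g : List (List Bool)) (L C i j : Nat)
    (hr : g.length ≤ 4 * L) (hrow : ∀ row ∈ g, List.length row ≤ 2 * C)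
    (hi : i < L) (hj : j < C) :
    entryM (scatterB (List.replicate L (List.replicate C 0x2800)) 0 g) i j = specCode g i j := by
  have hshape : GoodShape (List.replicate L (List.replicate C 0x2800)) L C := by
    refine ⟨by simp, fun k hk => ?_⟩
    rw [List.getD_replicate _ hk]
    simp
  rw [entry_scatterB g _ L C 0 i j hshape (by omega) hrow]
  have hentry : entryM (List.replicate L (List.replicate C 0x2800)) i j = 0x2800 := by
    unfold entryM
    rw [List.getD_replicate _ hi, List.getD_replicate _ hj]
  rw [hentry, gridBitsD_closed]
  simp only [Nat.zero_le, if_pos, Nat.sub_zero]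
  unfold specCode bitOf cell rowTermD
  simp only [brailleDotMap, List.getD_cons_zero, List.getD_cons_succ]
  simp only [show i*4 = 4*i from by ring, show i*4+1 = 4*i+1 from by ring,
    show i*4+2 = 4*i+2 from by ring, show i*4+3 = 4*i+3 from by ring]
  simp [Nat.lor_assoc]

-- ---- assembling both sides ----

theorem a_eq_spec (grid : List (List Bool)) (hg : grid ≠ [])
    (hc : (grid.map List.length).foldl max 0 ≠ 0) :
    grid_to_braille grid =
      specStr grid ((grid.length + 3) / 4) (((grid.map List.length).foldl max 0 + 1) / 2) := by
  have h0 : 0 < grid.length := List.length_pos_of_ne_nil hg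
  simp only [grid_to_braille, if_neg hg, if_neg hc]
  by_cases hr4 : grid.length ≤ 4
  · rw [if_pos hr4, chunk_to_braille_eq grid hr4]
    have hL : (grid.length + 3) / 4 = 1 := by omega
    unfold specStr
    rw [hL]
    rw [show List.range 1 = [0] from rfl, List.map_cons, List.map_nil, strjoin_single]
  · rw [if_neg hr4]
    unfold specStr
    congr 1
    apply List.ext_getElem
    · simp [chunksA_length]
    · intro k h1 h2
      have hk : k < (chunksA grid).length := by simpa using h1
      simp only [List.getElem_map, List.getElem_range]
      have hch : (chunksA grid)[k]'hk = (grid.drop (4*k)).take 4 := by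
        rw [← List.getD_eq_getElem _ [] hk, chunksA_getD]
      rw [hch]
      have hlen : (if ((grid.drop (4*k)).take 4).length < 4 then
          (grid.drop (4*k)).take 4 ++
            List.replicate (4 - ((grid.drop (4*k)).take 4).length)
              (List.replicate ((grid.map List.length).foldl max 0) false)
          else (grid.drop (4*k)).take 4).length ≤ 4 := by
        split_ifs with hl
        · simp only [List.length_append, List.length_replicate]
          omega
        · simp only [List.length_take]
          omega
      rw [chunk_to_braille_eq _ hlen]
      congr 1
      apply List.map_congr_left
      intro j _
      rw [specCode_chunk]

theorem b_eq_spec (grid : List (List Bool)) (hg : grid ≠ [])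
    (hc : (grid.map List.length).foldl max 0 ≠ 0) :
    grid_to_braille_alt grid =
      specStr grid ((grid.length + 3) / 4) (((grid.map List.length).foldl max 0 + 1) / 2) := by
  have h0 : 0 < grid.length := List.length_pos_of_ne_nil hg
  simp only [grid_to_braille_alt, if_neg hg, if_neg hc]
  unfold specStr
  congr 1
  set cols := (grid.map List.length).foldl max 0 with hcols
  set L := (grid.length + 3) / 4 with hLdef
  set C := (cols + 1) / 2 with hCdef
  have hshape0 : GoodShape (List.replicate L (List.replicate C 0x2800)) L C := by
    refine ⟨by simp, fun k hk => ?_⟩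
    rw [List.getD_replicate _ hk]
    simp
  have hshape : GoodShape (scatterB (List.replicate L (List.replicate C 0x2800)) 0 grid) L C :=
    shape_scatterB _ _ _ _ _ hshape0
  have hrow : ∀ row ∈ grid, List.length row ≤ 2 * C := by
    intro row hrowmem
    have hle : List.length row ≤ cols :=
      (PySem.List.le_foldl_max (grid.map List.length) 0).2 _ (List.mem_map_of_mem hrowmem)
    omega
  apply List.ext_getElem
  · simp [hshape.1]
  · intro i hi1 hi2
    have hiS : i < (scatterB (List.replicate L (List.replicate C 0x2800)) 0 grid).length := by
      simpa using hi1
    simp only [List.getElem_map, List.getElem_range]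
    have hiL : i < L := by simpa [hshape.1] using hiS
    congr 1
    apply List.ext_getElem
    · have := hshape.2 i hiL
      rw [List.getD_eq_getElem _ [] hiS] at this
      simp [this]
    · intro j hj1 hj2
      have hjS : j < ((scatterB (List.replicate L (List.replicate C 0x2800)) 0 grid)[i]'hiS).length := by
        simpa using hj1
      simp only [List.getElem_map, List.getElem_range]
      have hjC : j < C := by simpa using hj2
      have := entry_final grid L C i j (by omega) hrow hiL hjC
      unfold entryM at this
      rw [List.getD_eq_getElem _ [] hiS, List.getD_eq_getElem _ 0 hjS] at this
      rw [this]

-- ===== VERDICT (by name: the statement is the Claim_ definition above) =====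
theorem grid_to_braille_spec : Claim_equal_grid_to_braille := by
  intro grid _
  unfold Spec_grid_to_braille
  by_cases hg : grid = []
  · subst hg; rfl
  by_cases hc : (grid.map List.length).foldl max 0 = 0
  · simp [grid_to_braille, grid_to_braille_alt, hg, hc]
  · rw [a_eq_spec grid hg hc, b_eq_spec grid hg hc]
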